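-- pv_equiv track=rewrite | github.com/Deepthi-Vemula/scaler-python | 5-hashing/homework_2.py | colorful
-- ===== SOURCE A (Python) =====
-- def colorful(A):
--     hashMap = {}
--     numStr = str(A)
--     n = len(numStr)
--     for i in range(n):
--         pdt = 1
--         for j in range(i, n):
--             pdt *= int(numStr[j])
--             if pdt in hashMap.keys():
--                 return 0
--             hashMap[pdt] = 1
--     return 1
-- ===== SOURCE B (Python) =====
-- def colorful(A):
--     # single left-to-right pass; `ending` = products of all substrings ending at the
--     # current digit, extended by one digit each step (DP row), no nested index loops
--     products = []
--     ending = []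
--     for ch in str(A):
--         d = int(ch)
--         ending = [p * d for p in ending] + [d]
--         products += ending
--     return 1 if len(products) == len(set(products)) else 0
-- ===== Notes on version B (the rewrite author's own statement) =====
-- stated objective: alternative
-- what changed: B replaces A's nested start-index loops with incremental hash-map membership and early return by a single left-to-right pass maintaining the DP row of products of substrings ending at the current digit, then one final len(list)==len(set) distinctness check.
import Mathlib
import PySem

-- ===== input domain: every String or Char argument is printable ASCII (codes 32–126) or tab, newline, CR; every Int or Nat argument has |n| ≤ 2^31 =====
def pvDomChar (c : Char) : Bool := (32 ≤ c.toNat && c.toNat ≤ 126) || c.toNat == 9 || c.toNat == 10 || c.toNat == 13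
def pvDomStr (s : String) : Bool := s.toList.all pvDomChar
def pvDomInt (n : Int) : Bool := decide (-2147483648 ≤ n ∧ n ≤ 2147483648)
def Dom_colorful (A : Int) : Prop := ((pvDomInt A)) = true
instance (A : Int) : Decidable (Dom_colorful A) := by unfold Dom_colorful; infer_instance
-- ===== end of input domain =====

-- B replaces A's nested start-index loops + incremental hash map + early return by a single
-- left-to-right pass maintaining the DP row of products of substrings ENDING at the current
-- digit, then one final list-vs-set length distinctness check (alternative decomposition).

-- int(ch) for a single character; exact on Pre_ (0 ≤ A), where every character is a digit
def pyDigit (c : Char) : Int := (PySem.Int.ofChars? [c]).getD 0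

-- ===== PORT A =====
-- one step of A's inner j-loop: pdt *= int(numStr[j]); membership test; hashMap[pdt] = 1
def aStep (st : Option (Int × PySem.Dict Int Int)) (c : Char) : Option (Int × PySem.Dict Int Int) :=
  match st with
  | none => none
  | some (pdt, hashMap) =>
    let pdt := pdt * pyDigit c
    if (hashMap.get? pdt).isSome then none
    else some (pdt, hashMap.insert pdt 1)

-- one iteration of A's outer i-loop (none = the function has already returned 0)
def aOuter (numStr : List Char) (n : Int) (st : Option (PySem.Dict Int Int)) (i : Int) :
    Option (PySem.Dict Int Int) :=
  match st with
  | none => none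
  | some hashMap =>
    ((PySem.List.pyRange i n 1).foldl
      (fun st2 j => aStep st2 (PySem.List.pyGetD numStr j ' '))
      (some (1, hashMap))).map Prod.snd

def colorful (A : Int) : Int :=
  let numStr := (PySem.Int.toChars A)
  let n : Int := numStr.length
  match (PySem.List.pyRange 0 n 1).foldl (aOuter numStr n) (some PySem.Dict.empty) with
  | none => 0
  | some _ => 1

-- ===== PORT B =====
-- one step of B's single loop: d = int(ch); ending = [p*d for p in ending] + [d]; products += ending
def bStep (st : List Int × List Int) (c : Char) : List Int × List Int :=
  let d := pyDigit c
  let ending := st.2.map (· * d) ++ [d]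
  (st.1 ++ ending, ending)

def colorful_alt (A : Int) : Int :=
  let products := ((PySem.Int.toChars A).foldl bStep ([], [])).1
  if products.length = (PySem.Set.ofList products).length then 1 else 0

-- ===== PRECONDITION & SPEC =====
-- Pre_ excludes negative A, on which str(A) starts with '-' and int('-') raises ValueError in A (and in B)
def Pre_colorful (A : Int) : Prop := 0 ≤ A
instance (A : Int) : Decidable (Pre_colorful A) := by unfold Pre_colorful; infer_instance
def pvWitness_colorful : Int := 3245

def Spec_colorful (A : Int) (out : Int) : Prop := out = colorful_alt A
instance (A : Int) (out : Int) : Decidable (Spec_colorful A out) := by unfold Spec_colorful; infer_instance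

-- ===== CLAIM (what is proved, stated in full; the proofs are below) =====
def Claim_equal_colorful : Prop := ∀ (A : Int), Dom_colorful A → Pre_colorful A → Spec_colorful A (colorful A)

-- ===== LEMMAS AND PROOFS =====

-- running products of one row, starting from accumulated product p
def rowP (p : Int) : List Char → List Int
  | [] => []
  | c :: cs => (p * pyDigit c) :: rowP (p * pyDigit c) cs

-- all substring products, rows taken over the suffixes (A's enumeration order)
def allP : List Char → List Int
  | [] => []
  | c :: cs => rowP 1 (c :: cs) ++ allP cs

-- products B emits from an initial `ending` row (B's enumeration order)
def bProd : List Int → List Char → List Int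
  | _, [] => []
  | row, c :: cs =>
    let d := pyDigit c
    let row' := row.map (· * d) ++ [d]
    row' ++ bProd row' cs

-- A's duplicate check, per product
def chk (st : Option (PySem.Dict Int Int)) (p : Int) : Option (PySem.Dict Int Int) :=
  match st with
  | none => none
  | some h => if (h.get? p).isSome then none else some (h.insert p 1)

-- A's duplicate check over one whole row
def chkRow (st : Option (PySem.Dict Int Int)) (ds : List Char) : Option (PySem.Dict Int Int) :=
  match st with
  | none => none
  | some h => (rowP 1 ds).foldl chk (some h)

theorem foldl_chk_none (P : List Int) : P.foldl chk none = none := by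
  induction P with
  | nil => rfl
  | cons p P ih => simpa [chk] using ih

theorem foldl_aStep_none (cs : List Char) : cs.foldl aStep none = none := by
  induction cs with
  | nil => rfl
  | cons c cs ih => simpa [aStep] using ih

theorem innerA (cs : List Char) : ∀ (p : Int) (h : PySem.Dict Int Int),
    (cs.foldl aStep (some (p, h))).map Prod.snd = (rowP p cs).foldl chk (some h) := by
  induction cs with
  | nil => intro p h; rfl
  | cons c cs ih =>
    intro p h
    simp only [List.foldl_cons, aStep, rowP, chk]
    by_cases hm : (h.get? (p * pyDigit c)).isSome
    · simp [hm, foldl_aStep_none, foldl_chk_none]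
    · simp [hm, ih]

theorem aOuter_nat (cs : List Char) (st : Option (PySem.Dict Int Int)) (k : Nat) :
    aOuter cs (cs.length : Int) st (k : Int) = chkRow st (cs.drop k) := by
  cases st with
  | none => rfl
  | some h =>
    simp only [aOuter, chkRow]
    rw [PySem.List.foldl_pyRange_pyGetD' cs ' ' aStep (some (1, h)) (Int.natCast_nonneg k),
        Int.toNat_natCast, innerA]

theorem outerA (cs : List Char) : ∀ (st : Option (PySem.Dict Int Int)),
    (List.range cs.length).foldl (fun st k => chkRow st (cs.drop k)) st
      = match st with
        | none => none
        | some h => (allP cs).foldl chk (some h) := by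
  induction cs with
  | nil =>
    intro st
    cases st <;> rfl
  | cons c tl ih =>
    intro st
    rw [List.length_cons, List.range_succ_eq_map, List.foldl_cons, List.foldl_map]
    simp only [List.drop_succ_cons, List.drop_zero]
    rw [ih (chkRow st (c :: tl))]
    cases st with
    | none => rfl
    | some h =>
      simp only [chkRow, allP, List.foldl_append]
      rcases hr : (rowP 1 (c :: tl)).foldl chk (some h) with _ | h'
      · rw [foldl_chk_none]
      · rfl

theorem foldl_chk_isSome (P : List Int) : ∀ (h : PySem.Dict Int Int),
    (P.foldl chk (some h)).isSome = true ↔ (P.Nodup ∧ ∀ p ∈ P, h.get? p = none) := by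
  induction P with
  | nil => intro h; simp
  | cons p P ih =>
    intro h
    simp only [List.foldl_cons, chk]
    by_cases hm : (h.get? p).isSome
    · rw [if_pos hm, foldl_chk_none]
      simp only [Option.isSome_none]
      constructor
      · intro hc; exact absurd hc (by simp)
      · rintro ⟨-, hall⟩
        have := hall p (by simp)
        rw [this] at hm
        simp at hm
    · rw [if_neg hm, ih]
      have hpn : h.get? p = none := by
        cases hg : h.get? p with
        | none => rfl
        | some v => rw [hg] at hm; simp at hm
      constructor
      · rintro ⟨hnd, hall⟩
        refine ⟨List.nodup_cons.mpr ⟨?_, hnd⟩, ?_⟩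
        · intro hmem
          have := hall p hmem
          rw [PySem.Dict.get?_insert] at this
          simp at this
        · intro q hq
          rcases List.mem_cons.mp hq with rfl | hq'
          · exact hpn
          · have := hall q hq'
            rw [PySem.Dict.get?_insert] at this
            by_cases hqp : q = p
            · simp [hqp] at this
            · rwa [if_neg hqp] at this
      · rintro ⟨hnd, hall⟩
        rcases List.nodup_cons.mp hnd with ⟨hnp, hnd'⟩
        refine ⟨hnd', ?_⟩
        intro q hq
        rw [PySem.Dict.get?_insert, if_neg (by rintro rfl; exact hnp hq)]
        exact hall q (List.mem_cons_of_mem _ hq)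

theorem discard_sublist (s : PySem.Set Int) (x : Int) : (PySem.Set.discard s x).Sublist s := by
  unfold PySem.Set.discard
  exact List.filter_sublist

-- set(xs) is a sublist of xs (first occurrences, in order)
theorem ofList_sublist (xs : List Int) : (PySem.Set.ofList xs).Sublist xs := by
  induction xs with
  | nil => simp [PySem.Set.ofList_nil]
  | cons x xs ih =>
    rw [PySem.Set.ofList_cons]
    exact List.Sublist.cons₂ x ((discard_sublist _ _).trans ih)

theorem length_ofList_iff (xs : List Int) :
    xs.length = (PySem.Set.ofList xs).length ↔ xs.Nodup := by
  constructor
  · intro hl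
    have heq : PySem.Set.ofList xs = xs := (ofList_sublist xs).eq_of_length hl.symm
    rw [← heq]
    exact PySem.Set.nodup_ofList xs
  · intro hnd
    rw [PySem.Set.ofList_eq_self_of_nodup xs hnd]

-- the fold of B's loop accumulates exactly bProd
theorem foldl_bStep (cs : List Char) : ∀ (prods row : List Int),
    (cs.foldl bStep (prods, row)).1 = prods ++ bProd row cs := by
  induction cs with
  | nil => intro prods row; simp [bProd]
  | cons c cs ih =>
    intro prods row
    simp only [List.foldl_cons, bStep, bProd]
    rw [ih]
    simp

-- flatten of a list of conses splits into heads ++ flatten of tails (up to permutation)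
theorem flatten_cons_split (l : List Int) (f : Int → Int) (g : Int → List Int) :
    ((l.map (fun p => f p :: g p)).flatten).Perm (l.map f ++ (l.map g).flatten) := by
  induction l with
  | nil => simp
  | cons x xs ih =>
    simp only [List.map_cons, List.flatten_cons, List.cons_append]
    refine List.Perm.cons _ ?_
    refine (ih.append_left (g x)).trans ?_
    rw [← List.append_assoc, ← List.append_assoc]
    exact List.perm_append_comm.append_right _

-- B's product list is a permutation of A's: each pending accumulator p contributes its row
theorem bProd_perm (cs : List Char) : ∀ (row : List Int),
    (bProd row cs).Perm ((row.map (fun p => rowP p cs)).flatten ++ allP cs) := by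
  induction cs with
  | nil => intro row; simp [bProd, allP, rowP]
  | cons c cs ih =>
    intro row
    have hrow' := ih (row.map (· * pyDigit c) ++ [pyDigit c])
    simp only [bProd]
    refine (hrow'.append_left _).trans ?_
    simp only [List.map_append, List.map_cons, List.map_nil, List.flatten_append,
      List.flatten_cons, List.flatten_nil, List.append_nil]
    -- goal: (rm ++ [d]) ++ ((M ++ rowP d cs) ++ allP cs) ~ RHS
    have hR : (row.map (fun p => rowP p (c :: cs))).flatten
        = (row.map (fun p => (p * pyDigit c) :: rowP (p * pyDigit c) cs)).flatten := by
      simp [rowP]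
    rw [hR]
    have hsplit := flatten_cons_split row (fun p => p * pyDigit c)
      (fun p => rowP (p * pyDigit c) cs)
    have hmm : row.map (fun p => rowP (p * pyDigit c) cs)
        = (row.map (· * pyDigit c)).map (fun q => rowP q cs) := by
      simp [List.map_map, Function.comp]
    rw [hmm] at hsplit
    refine List.Perm.trans ?_ ((hsplit.symm.append_right _))
    have hall : allP (c :: cs) = pyDigit c :: (rowP (pyDigit c) cs ++ allP cs) := by
      simp [allP, rowP]
    rw [hall]
    -- pure multiset juggling over four blocks and the singleton [d]
    set rm := row.map (· * pyDigit c) with hrm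
    set M := ((row.map (· * pyDigit c)).map fun q => rowP q cs).flatten with hM
    set R := rowP (pyDigit c) cs with hRdef
    set S := allP cs with hS
    have h1 : (rm ++ [pyDigit c]) ++ ((M ++ R) ++ S)
        = rm ++ (([pyDigit c] ++ M) ++ (R ++ S)) := by simp [List.append_assoc]
    have h2 : (rm ++ M) ++ (pyDigit c :: (R ++ S))
        = rm ++ ((M ++ [pyDigit c]) ++ (R ++ S)) := by simp [List.append_assoc]
    rw [h1, h2]
    exact ((List.perm_append_comm).append_right (R ++ S)).append_left rm

theorem colorful_eq_nodup (A : Int) :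
    colorful A = if (allP (PySem.Int.toChars A)).Nodup then 1 else 0 := by
  simp only [colorful, PySem.List.pyRange_zero_nat, List.foldl_map, aOuter_nat]
  rw [outerA]
  rcases hres : (allP (PySem.Int.toChars A)).foldl chk (some PySem.Dict.empty) with _ | h'
  · have hnot : ¬ (allP (PySem.Int.toChars A)).Nodup := by
      intro hnd
      have := (foldl_chk_isSome (allP (PySem.Int.toChars A)) PySem.Dict.empty).mpr
        ⟨hnd, fun p _ => rfl⟩
      rw [hres] at this
      simp at this
    simp [hres, hnot]
  · have hnd : (allP (PySem.Int.toChars A)).Nodup :=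
      ((foldl_chk_isSome (allP (PySem.Int.toChars A)) PySem.Dict.empty).mp
        (by rw [hres]; rfl)).1
    simp [hres, hnd]

theorem colorful_alt_eq_nodup (A : Int) :
    colorful_alt A = if (allP (PySem.Int.toChars A)).Nodup then 1 else 0 := by
  have hperm : (bProd [] (PySem.Int.toChars A)).Perm (allP (PySem.Int.toChars A)) := by
    simpa using bProd_perm (PySem.Int.toChars A) []
  simp only [colorful_alt, foldl_bStep, List.nil_append]
  by_cases hnd : (allP (PySem.Int.toChars A)).Nodup
  · rw [if_pos ((length_ofList_iff _).mpr (hperm.nodup_iff.mpr hnd)), if_pos hnd]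
  · rw [if_neg (fun hl => hnd (hperm.nodup_iff.mp ((length_ofList_iff _).mp hl))), if_neg hnd]

-- ===== VERDICT (by name: the statement is the Claim_ definition above) =====
theorem colorful_spec : Claim_equal_colorful := by
  intro A _ _
  unfold Spec_colorful
  rw [colorful_eq_nodup, colorful_alt_eq_nodup]
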